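-- pv_equiv track=rewrite | github.com/KellzCodes/python | fundamentals/projects/guessing-game/guessingGame.py | computerGuess
-- ===== SOURCE A (Python) =====
-- def computerGuess(lowVal, highVal, randnum, count = 0):
-- 	if highVal >= lowVal:
-- 		guess = lowVal + (highVal - lowVal) // 2
-- 		# If guess is in the middle, it is found!
-- 		if guess == randnum:
-- 			return count
-- 		# If "guess" is greater than the number,
-- 		# it must be found in the lower half of the set of numbers
-- 		# between the lower value and the guess
-- 		elif guess > randnum:
-- 			count = count + 1
-- 			return computerGuess(lowVal, guess - 1, randnum, count)
-- 		# The number must be in the upper set of numbers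
-- 		# between the guess and the upper value
-- 		else:
-- 			count = count + 1
-- 			return computerGuess(guess + 1, highVal, randnum, count)
-- 	else:
-- 		# number not found
-- 		return -1
-- ===== SOURCE B (Python) =====
-- def computerGuess(lowVal, highVal, randnum, count=0):
--     while highVal >= lowVal:
--         guess = lowVal + (highVal - lowVal) // 2
--         if guess == randnum:
--             return count
--         if guess > randnum:
--             highVal = guess - 1
--         else:
--             lowVal = guess + 1
--         count += 1
--     return -1
-- ===== Notes on version B (the rewrite author's own statement) =====
-- stated objective: idiomatic
-- what changed: Replaces the tail recursion by an iterative while loop that mutates lowVal/highVal/count in place, as binary search is usually written in Python.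
import Mathlib
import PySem

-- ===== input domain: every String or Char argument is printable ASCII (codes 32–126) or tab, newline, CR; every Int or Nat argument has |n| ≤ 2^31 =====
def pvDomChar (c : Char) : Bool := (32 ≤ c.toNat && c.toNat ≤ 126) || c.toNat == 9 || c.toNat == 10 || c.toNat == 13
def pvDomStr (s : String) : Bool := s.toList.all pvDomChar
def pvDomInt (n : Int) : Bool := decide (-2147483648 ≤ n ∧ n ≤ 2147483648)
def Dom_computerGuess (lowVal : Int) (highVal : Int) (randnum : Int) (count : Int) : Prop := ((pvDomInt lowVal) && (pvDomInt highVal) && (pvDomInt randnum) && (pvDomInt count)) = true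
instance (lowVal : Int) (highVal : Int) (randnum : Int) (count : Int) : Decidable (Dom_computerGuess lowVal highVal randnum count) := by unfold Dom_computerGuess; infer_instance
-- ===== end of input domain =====

-- B is the same binary search written as an iterative while loop instead of A's tail recursion (idiomatic rewrite; return values identical on all inputs).

-- ===== PORT A =====
-- literal transliteration of A's recursion; terminates since the interval shrinks
def computerGuess (lowVal : Int) (highVal : Int) (randnum : Int) (count : Int) : Int :=
  if highVal ≥ lowVal then
    let guess := lowVal + PySem.Int.floordiv (highVal - lowVal) 2
    if guess = randnum then count
    else if guess > randnum then computerGuess lowVal (guess - 1) randnum (count + 1)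
    else computerGuess (guess + 1) highVal randnum (count + 1)
  else -1
termination_by (highVal - lowVal + 1).toNat
decreasing_by
  all_goals
    rw [PySem.Int.floordiv_eq_ediv_of_pos (by omega : (0:Int) < 2)] at *
    omega

-- ===== PORT B =====
-- B's while loop, ported as a fuel-indexed loop over the mutable state (lowVal, highVal, count);
-- the fuel only makes the loop total and is provably sufficient (pvAltFuel_enough below).
def pvAltLoop : Nat → Int → Int → Int → Int → Int
  | 0, _, _, _, _ => -1
  | Nat.succ n, lowVal, highVal, randnum, count =>
    if highVal ≥ lowVal then
      let guess := lowVal + PySem.Int.floordiv (highVal - lowVal) 2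
      if guess = randnum then count
      else if guess > randnum then pvAltLoop n lowVal (guess - 1) randnum (count + 1)
      else pvAltLoop n (guess + 1) highVal randnum (count + 1)
    else -1

def computerGuess_alt (lowVal : Int) (highVal : Int) (randnum : Int) (count : Int) : Int :=
  pvAltLoop ((highVal - lowVal + 1).toNat + 1) lowVal highVal randnum count

-- ===== PRECONDITION & SPEC =====
def Spec_computerGuess (lowVal : Int) (highVal : Int) (randnum : Int) (count : Int) (out : Int) : Prop := out = computerGuess_alt lowVal highVal randnum count
instance (lowVal : Int) (highVal : Int) (randnum : Int) (count : Int) (out : Int) : Decidable (Spec_computerGuess lowVal highVal randnum count out) := by unfold Spec_computerGuess; infer_instance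

-- ===== CLAIM (what is proved, stated in full; the proofs are below) =====
def Claim_equal_computerGuess : Prop := ∀ (lowVal : Int) (highVal : Int) (randnum : Int) (count : Int), Dom_computerGuess lowVal highVal randnum count → Spec_computerGuess lowVal highVal randnum count (computerGuess lowVal highVal randnum count)

-- ===== LEMMAS AND PROOFS =====
-- with enough fuel, B's loop computes A's recursion
theorem pvAltFuel_enough (n : Nat) : ∀ (lowVal highVal randnum count : Int),
    (highVal - lowVal + 1).toNat < n →
    pvAltLoop n lowVal highVal randnum count = computerGuess lowVal highVal randnum count := by
  induction n with
  | zero => intro lo hi r c h; omega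
  | succ n ih =>
    intro lo hi r c h
    rw [computerGuess]
    simp only [pvAltLoop]
    have hfd : PySem.Int.floordiv (hi - lo) 2 = (hi - lo) / 2 :=
      PySem.Int.floordiv_eq_ediv_of_pos (by omega)
    simp only [hfd]
    split_ifs with hge h1 h2
    · rfl
    · exact ih _ _ _ _ (by omega)
    · exact ih _ _ _ _ (by omega)
    · rfl

-- ===== VERDICT (by name: the statement is the Claim_ definition above) =====
theorem computerGuess_spec : Claim_equal_computerGuess := by
  intro lo hi r c _
  unfold Spec_computerGuess computerGuess_alt
  exact (pvAltFuel_enough _ lo hi r c (by omega)).symm
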